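-- pv_equiv track=rewrite | github.com/veselydp/pv248 | 08/student.py | getCumPoints
-- ===== SOURCE A (Python) =====
-- def getCumPoints(file, columns, uniqueDates):
--     dateArr = []
--     cumulTemp = 0
--     for date in uniqueDates:
--         for column in columns:
--             if (column.find(date)) != -1:
--                 cumulTemp += file[column]
--         dateArr.append(cumulTemp)
--     return dateArr
-- ===== SOURCE B (Python) =====
-- def getCumPoints(file, columns, uniqueDates):
--     # Inverted traversal: outer loop over columns, scattering each column's
--     # value into a per-date delta table; then a prefix-sum pass over the table.
--     # Correct because integer addition is commutative/associative, so the
--     # per-date totals do not depend on the summation order.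
--     deltas = [0] * len(uniqueDates)
--     for column in columns:
--         for i, date in enumerate(uniqueDates):
--             if column.find(date) != -1:
--                 deltas[i] += file[column]
--     out = []
--     total = 0
--     for d in deltas:
--         total += d
--         out.append(total)
--     return out
-- ===== Notes on version B (the rewrite author's own statement) =====
-- stated objective: alternative
-- what changed: A runs one date-outer interleaved loop carrying a running total; B inverts the traversal (columns outer), scatters each column's value into a per-date delta table, and produces the result by a separate prefix-sum pass over that table, relying on commutativity of integer addition.
import Mathlib
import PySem

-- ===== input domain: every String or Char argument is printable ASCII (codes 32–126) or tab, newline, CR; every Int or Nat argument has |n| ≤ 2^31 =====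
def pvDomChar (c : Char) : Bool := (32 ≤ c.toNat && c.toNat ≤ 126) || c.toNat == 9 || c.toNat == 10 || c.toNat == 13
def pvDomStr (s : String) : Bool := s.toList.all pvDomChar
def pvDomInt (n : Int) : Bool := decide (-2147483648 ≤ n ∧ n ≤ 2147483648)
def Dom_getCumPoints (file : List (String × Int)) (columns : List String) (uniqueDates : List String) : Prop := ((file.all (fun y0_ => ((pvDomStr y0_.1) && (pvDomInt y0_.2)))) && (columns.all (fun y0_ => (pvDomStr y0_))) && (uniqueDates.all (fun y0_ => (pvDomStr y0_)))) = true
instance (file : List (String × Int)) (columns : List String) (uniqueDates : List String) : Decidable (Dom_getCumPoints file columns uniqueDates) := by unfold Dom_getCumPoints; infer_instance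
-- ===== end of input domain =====

-- B inverts A's traversal: a column-outer scatter into a per-date delta table followed by a prefix-sum pass ("alternative", same cost).


-- ===== PORT A =====
-- for date in uniqueDates: for column in columns: if column.find(date) != -1: cumulTemp += file[column]; dateArr.append(cumulTemp)
-- (file[column] raises KeyError on a missing key; Pre_ excludes that, the port reads getD there)
def getCumPoints (file : List (String × Int)) (columns : List String) (uniqueDates : List String) : List Int :=
  (uniqueDates.foldl (fun (st : List Int × Int) date =>
      let cumulTemp := columns.foldl (fun cumulTemp column =>
        if PySem.Str.find column date ≠ -1 then cumulTemp + (PySem.Dict.mk file).getD column 0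
        else cumulTemp) st.2
      (st.1 ++ [cumulTemp], cumulTemp)) ([], 0)).1

-- ===== PORT B =====
-- deltas = [0]*len(uniqueDates); for column: for i,date in enumerate(uniqueDates): if match: deltas[i] += file[column];
-- then a prefix-sum pass over deltas.  The indexed in-place update of deltas[i] is ported as the
-- componentwise zip-with-uniqueDates map (exact: deltas and uniqueDates have equal length throughout).
def getCumPoints_alt (file : List (String × Int)) (columns : List String) (uniqueDates : List String) : List Int :=
  let deltas := columns.foldl (fun (deltas : List Int) column =>
      (deltas.zip uniqueDates).map (fun p =>
        if PySem.Str.find column p.2 ≠ -1 then p.1 + (PySem.Dict.mk file).getD column 0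
        else p.1))
    (uniqueDates.map (fun _ => (0:Int)))
  (deltas.foldl (fun (st : List Int × Int) d => (st.1 ++ [st.2 + d], st.2 + d)) ([], 0)).1

-- ===== PRECONDITION & SPEC =====
-- Pre_ excludes exactly the inputs where Python raises KeyError: a column matching some date that is not a key of file.
def Pre_getCumPoints (file : List (String × Int)) (columns : List String) (uniqueDates : List String) : Prop :=
  ∀ date ∈ uniqueDates, ∀ column ∈ columns,
    PySem.Str.find column date ≠ -1 → ((PySem.Dict.mk file).get? column).isSome
instance (file : List (String × Int)) (columns : List String) (uniqueDates : List String) : Decidable (Pre_getCumPoints file columns uniqueDates) := by unfold Pre_getCumPoints; infer_instance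

def pvWitness_getCumPoints : (List (String × Int)) × List String × List String :=
  ([("hw1 2020-01", 3), ("hw2 2020-02", 5)], ["hw1 2020-01", "hw2 2020-02"], ["2020-01", "2020-02", "zzz"])

def Spec_getCumPoints (file : List (String × Int)) (columns : List String) (uniqueDates : List String) (out : List Int) : Prop := out = getCumPoints_alt file columns uniqueDates
instance (file : List (String × Int)) (columns : List String) (uniqueDates : List String) (out : List Int) : Decidable (Spec_getCumPoints file columns uniqueDates out) := by unfold Spec_getCumPoints; infer_instance

-- ===== CLAIM (what is proved, stated in full; the proofs are below) =====
def Claim_equal_getCumPoints : Prop := ∀ (file : List (String × Int)) (columns : List String) (uniqueDates : List String), Dom_getCumPoints file columns uniqueDates → Pre_getCumPoints file columns uniqueDates → Spec_getCumPoints file columns uniqueDates (getCumPoints file columns uniqueDates)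

-- ===== LEMMAS AND PROOFS =====

-- the per-date sum of matching column values (summation-order-free description of both loops)
def pvS (file : List (String × Int)) (columns : List String) (date : String) : Int :=
  columns.foldl (fun s column =>
    if PySem.Str.find column date ≠ -1 then s + (PySem.Dict.mk file).getD column 0
    else s) 0

-- B's componentwise step splits over a cons of the date/delta lists
theorem pvCompSplit (file : List (String × Int)) (columns : List String)
    (d : String) (ds : List String) (x : Int) (xs : List Int) :
    columns.foldl (fun (deltas : List Int) column =>
        (deltas.zip (d :: ds)).map (fun p =>
          if PySem.Str.find column p.2 ≠ -1 then p.1 + (PySem.Dict.mk file).getD column 0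
          else p.1)) (x :: xs)
    = (columns.foldl (fun y column =>
          if PySem.Str.find column d ≠ -1 then y + (PySem.Dict.mk file).getD column 0
          else y) x)
      :: (columns.foldl (fun (deltas : List Int) column =>
            (deltas.zip ds).map (fun p =>
              if PySem.Str.find column p.2 ≠ -1 then p.1 + (PySem.Dict.mk file).getD column 0
              else p.1)) xs) := by
  induction columns generalizing x xs with
  | nil => simp
  | cons c cs ih => simp only [List.foldl_cons, List.zip_cons_cons, List.map_cons]; exact ih _ _

-- B's scatter fold over columns computes exactly the per-date sums
theorem pvDeltas (file : List (String × Int)) (columns : List String) (uniqueDates : List String) :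
    columns.foldl (fun (deltas : List Int) column =>
        (deltas.zip uniqueDates).map (fun p =>
          if PySem.Str.find column p.2 ≠ -1 then p.1 + (PySem.Dict.mk file).getD column 0
          else p.1)) (uniqueDates.map (fun _ => (0:Int)))
    = uniqueDates.map (pvS file columns) := by
  induction uniqueDates with
  | nil =>
    induction columns with
    | nil => simp
    | cons c cs ih => simpa using ih
  | cons d ds ih =>
    simp only [List.map_cons]
    rw [pvCompSplit, ih]
    rfl

-- A's inner loop from a running total t is t plus the same loop from 0 (integer addition regroups).
theorem pvInnerShift (file : List (String × Int)) (columns : List String) (date : String) (t : Int) :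
    columns.foldl (fun cumulTemp column =>
      if PySem.Str.find column date ≠ -1 then cumulTemp + (PySem.Dict.mk file).getD column 0
      else cumulTemp) t
    = t + pvS file columns date := by
  unfold pvS
  induction columns generalizing t with
  | nil => simp
  | cons c cs ih =>
    simp only [List.foldl_cons]
    by_cases h : PySem.Str.find c date ≠ -1
    · simp only [if_pos h]
      rw [ih, ih ((0:Int) + _)]
      ring
    · simp only [if_neg h]
      exact ih t

-- ===== VERDICT (by name: the statement is the Claim_ definition above) =====
theorem getCumPoints_spec : Claim_equal_getCumPoints := by
  intro file columns uniqueDates _ _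
  unfold Spec_getCumPoints getCumPoints getCumPoints_alt
  rw [pvDeltas]
  simp only [List.foldl_map]
  congr 2
  funext st date
  simp only [pvInnerShift file columns date st.2]
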